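-- pv_equiv track=rewrite | github.com/CloudSecurityAlliance/csa-plugins-official | plugins/cwe-analysis/scripts/cwe-tool.py | _compact_consequences
-- ===== SOURCE A (Python) =====
-- def _parse_kv_segments(raw):
--     """Parse a ``::KEY:val:KEY:val::`` encoded string into a list of dicts.
--
--     Each ``::``-delimited segment is split on ``:`` into consecutive key/value
--     pairs.  Returns a list of dicts, one per non-empty segment.
--     """
--     results = []
--     segments = raw.split("::")
--     for seg in segments:
--         seg = seg.strip()
--         if not seg:
--             continue
--         parts = seg.split(":")
--         kv = {}
--         i = 0
--         while i < len(parts) - 1: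
--             key = parts[i].strip()
--             val = parts[i + 1].strip()
--             if key:
--                 # Some keys repeat (e.g. SCOPE, IMPACT) – collect as list
--                 if key in kv:
--                     existing = kv[key]
--                     if isinstance(existing, list):
--                         existing.append(val)
--                     else:
--                         kv[key] = [existing, val]
--                 else:
--                     kv[key] = val
--             i += 2
--         if kv:
--             results.append(kv)
--     return results
--
-- def _compact_consequences(raw):
--     """Format Common Consequences as a single compact line.
--
--     Groups impacts by scope, deduplicates, returns e.g.:
--     "Confidentiality (Read Data), Availability (DoS: Crash, DoS: Resource Consumption)"
--     """
--     if not raw or not raw.strip():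
--         return "(none)"
--     segments = _parse_kv_segments(raw)
--     # Group impacts by scope, dedup
--     scope_impacts = {}
--     for kv in segments:
--         scope = kv.get("SCOPE", "")
--         impact = kv.get("IMPACT", "")
--         if isinstance(scope, list):
--             scopes = scope
--         else:
--             scopes = [scope] if scope else []
--         if isinstance(impact, list):
--             impacts = impact
--         else:
--             impacts = [impact] if impact else []
--         for s in scopes:
--             s = s.strip()
--             if not s:
--                 continue
--             if s not in scope_impacts:
--                 scope_impacts[s] = []
--             for imp in impacts:
--                 imp = imp.strip()
--                 if imp and imp not in scope_impacts[s]: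
--                     scope_impacts[s].append(imp)
--     if not scope_impacts:
--         return "(none)"
--     parts = []
--     for scope, impacts in scope_impacts.items():
--         if impacts:
--             parts.append(f"{scope} ({', '.join(impacts)})")
--         else:
--             parts.append(scope)
--     return ", ".join(parts)
-- ===== SOURCE B (Python) =====
-- def _compact_consequences(raw):
--     """Single-pass rewrite: scan each ``::`` segment once, collecting SCOPE and
--     IMPACT values directly (no intermediate list-of-dicts, no isinstance
--     regrouping), then group/dedup impacts by scope and format the line."""
--     if not raw or not raw.strip():
--         return "(none)"
--     scope_impacts = {}
--     for seg in raw.split("::"):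
--         seg = seg.strip()
--         if not seg:
--             continue
--         parts = seg.split(":")
--         scopes = []
--         impacts = []
--         for i in range(0, len(parts) - 1, 2):
--             key = parts[i].strip()
--             if key == "SCOPE":
--                 scopes.append(parts[i + 1].strip())
--             elif key == "IMPACT":
--                 impacts.append(parts[i + 1].strip())
--         for s in scopes:
--             if not s:
--                 continue
--             if s not in scope_impacts:
--                 scope_impacts[s] = []
--             for imp in impacts:
--                 if imp and imp not in scope_impacts[s]:
--                     scope_impacts[s].append(imp)
--     if not scope_impacts:
--         return "(none)"
--     out = []
--     for scope, impacts in scope_impacts.items():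
--         out.append(f"{scope} ({', '.join(impacts)})" if impacts else scope)
--     return ", ".join(out)
-- ===== Notes on version B (the rewrite author's own statement) =====
-- stated objective: simpler
-- what changed: Fuses parsing and grouping into one pass: instead of building an intermediate list of per-segment dicts (with str-vs-list values and isinstance regrouping), B scans each '::' segment's ':'-pairs once, collecting SCOPE and IMPACT values into two plain lists, then groups/dedups directly.
import Mathlib
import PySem

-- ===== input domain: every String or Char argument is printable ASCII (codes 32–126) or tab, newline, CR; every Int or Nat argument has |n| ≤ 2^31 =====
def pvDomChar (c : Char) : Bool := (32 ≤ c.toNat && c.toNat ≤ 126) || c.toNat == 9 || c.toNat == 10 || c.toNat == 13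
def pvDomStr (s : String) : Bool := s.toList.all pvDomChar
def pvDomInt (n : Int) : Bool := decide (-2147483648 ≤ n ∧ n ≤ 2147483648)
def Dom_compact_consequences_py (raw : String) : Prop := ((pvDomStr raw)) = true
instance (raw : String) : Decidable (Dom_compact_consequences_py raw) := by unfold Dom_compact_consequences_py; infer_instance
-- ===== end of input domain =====

-- ===== PORT A =====
-- B fuses A's two phases (parse into per-segment dicts, then regroup) into a single pass per
-- segment; same return value everywhere (equivalence is about the return value; neither mutates).

-- helper for A: the while-loop of _parse_kv_segments building the per-segment dict
-- (dict values are str or list[str] in Python: modelled as String ⊕ List String)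
def pvKvLoopA (parts : List String) (i : Nat)
    (kv : PySem.Dict String (String ⊕ List String)) : PySem.Dict String (String ⊕ List String) :=
  if _h : i + 1 < parts.length then
    let key := PySem.Str.strip (parts.getD i "")
    let val := PySem.Str.strip (parts.getD (i + 1) "")
    let kv' :=
      if key = "" then kv
      else
        match kv.get? key with
        | some (Sum.inr l) => kv.insert key (Sum.inr (l ++ [val]))
        | some (Sum.inl u) => kv.insert key (Sum.inr [u, val])
        | none => kv.insert key (Sum.inl val)
    pvKvLoopA parts (i + 2) kv'
  else kv
termination_by parts.length - i

-- helper for A: _parse_kv_segments (raw.split("::") is total for the non-empty literal separator,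
-- hence the .getD [])
def pvParseKvSegments (raw : String) : List (PySem.Dict String (String ⊕ List String)) :=
  ((PySem.Str.split? raw "::").getD []).foldl (fun results seg0 =>
    let seg := PySem.Str.strip seg0
    if seg = "" then results
    else
      let kv := pvKvLoopA ((PySem.Str.split? seg ":").getD []) 0 PySem.Dict.empty
      if kv.size = 0 then results else results ++ [kv]) []

-- helper for A: the body of the "for kv in segments" grouping loop
def pvGroupStepA (si : PySem.Dict String (List String))
    (kv : PySem.Dict String (String ⊕ List String)) : PySem.Dict String (List String) :=
  let scope := kv.getD "SCOPE" (Sum.inl "")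
  let impact := kv.getD "IMPACT" (Sum.inl "")
  let scopes : List String :=
    match scope with
    | Sum.inr l => l
    | Sum.inl s => if s = "" then [] else [s]
  let impacts : List String :=
    match impact with
    | Sum.inr l => l
    | Sum.inl s => if s = "" then [] else [s]
  scopes.foldl (fun si s0 =>
    let s := PySem.Str.strip s0
    if s = "" then si
    else
      let si := if si.contains s then si else si.insert s []
      impacts.foldl (fun si imp0 =>
        let imp := PySem.Str.strip imp0
        if imp = "" then si
        else if (si.getD s []).contains imp then si
        else si.insert s (si.getD s [] ++ [imp])) si) si

-- shared final formatting: identical trailing lines of both Pythons ("parts.append(...); ', '.join")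
def pvFormatLine (si : PySem.Dict String (List String)) : String :=
  PySem.Str.join ", " (si.items.foldl (fun ps p =>
    if p.2 ≠ [] then ps ++ [p.1 ++ " (" ++ PySem.Str.join ", " p.2 ++ ")"]
    else ps ++ [p.1]) [])

def compact_consequences_py (raw : String) : String :=
  if raw = "" ∨ PySem.Str.strip raw = "" then "(none)"
  else
    let segments := pvParseKvSegments raw
    let scope_impacts := segments.foldl pvGroupStepA PySem.Dict.empty
    if scope_impacts.size = 0 then "(none)"
    else pvFormatLine scope_impacts

-- ===== PORT B =====
-- helper for B: "for i in range(0, len(parts) - 1, 2)" collecting SCOPE / IMPACT values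
def pvSegScanB (parts : List String) (i : Nat) (scopes impacts : List String) :
    List String × List String :=
  if _h : i + 1 < parts.length then
    let key := PySem.Str.strip (parts.getD i "")
    if key = "SCOPE" then
      pvSegScanB parts (i + 2) (scopes ++ [PySem.Str.strip (parts.getD (i + 1) "")]) impacts
    else if key = "IMPACT" then
      pvSegScanB parts (i + 2) scopes (impacts ++ [PySem.Str.strip (parts.getD (i + 1) "")])
    else pvSegScanB parts (i + 2) scopes impacts
  else (scopes, impacts)
termination_by parts.length - i

-- helper for B: the body of B's single "for seg in raw.split('::')" loop
def pvGroupStepB (si : PySem.Dict String (List String)) (seg0 : String) :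
    PySem.Dict String (List String) :=
  let seg := PySem.Str.strip seg0
  if seg = "" then si
  else
    let parts := (PySem.Str.split? seg ":").getD []
    let sc := pvSegScanB parts 0 [] []
    sc.1.foldl (fun si s =>
      if s = "" then si
      else
        let si := if si.contains s then si else si.insert s []
        sc.2.foldl (fun si imp =>
          if imp = "" then si
          else if (si.getD s []).contains imp then si
          else si.insert s (si.getD s [] ++ [imp])) si) si

def compact_consequences_py_alt (raw : String) : String :=
  if raw = "" ∨ PySem.Str.strip raw = "" then "(none)"
  else
    let scope_impacts := ((PySem.Str.split? raw "::").getD []).foldl pvGroupStepB PySem.Dict.empty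
    if scope_impacts.size = 0 then "(none)"
    else pvFormatLine scope_impacts

-- ===== PRECONDITION & SPEC =====
def Spec_compact_consequences_py (raw : String) (out : String) : Prop := out = compact_consequences_py_alt raw
instance (raw : String) (out : String) : Decidable (Spec_compact_consequences_py raw out) := by unfold Spec_compact_consequences_py; infer_instance

-- ===== CLAIM (what is proved, stated in full; the proofs are below) =====
def Claim_equal_compact_consequences_py : Prop := ∀ (raw : String), Dom_compact_consequences_py raw → Spec_compact_consequences_py raw (compact_consequences_py raw)

-- ===== LEMMAS AND PROOFS =====

-- stripping is idempotent (used because A re-strips values that were already stripped)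
theorem pv_dropWhile_fix_prefix {p : Char → Bool} {t s : List Char} (h : t.dropWhile p = t)
    (hp : s <+: t) : s.dropWhile p = s := by
  cases s with
  | nil => simp
  | cons a s' =>
    cases t with
    | nil => simp at hp
    | cons b t' =>
      rw [List.cons_prefix_cons] at hp
      obtain ⟨rfl, -⟩ := hp
      rw [List.dropWhile_cons] at h ⊢
      by_cases hpa : p a
      · simp only [hpa, if_true] at h
        have := List.length_dropWhile_le p t'
        rw [h] at this
        simp at this
      · simp [hpa]

theorem pv_strip_idem_chars (l : List Char) :
    PySem.Chars.strip (PySem.Chars.strip l) = PySem.Chars.strip l := by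
  simp only [PySem.Chars.strip, PySem.Chars.lstrip, PySem.Chars.rstrip]
  have h1 : ((((l.dropWhile PySem.Chars.isspace).reverse.dropWhile PySem.Chars.isspace).reverse).dropWhile PySem.Chars.isspace)
      = ((l.dropWhile PySem.Chars.isspace).reverse.dropWhile PySem.Chars.isspace).reverse := by
    apply pv_dropWhile_fix_prefix (t := l.dropWhile PySem.Chars.isspace) (List.dropWhile_idempotent _ _)
    simpa using List.reverse_prefix.mpr (List.dropWhile_suffix (l := (l.dropWhile PySem.Chars.isspace).reverse) PySem.Chars.isspace)
  rw [h1, List.reverse_reverse, List.dropWhile_idempotent]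

theorem pv_strip_idem (s : String) : PySem.Str.strip (PySem.Str.strip s) = PySem.Str.strip s := by
  have h := pv_strip_idem_chars s.toList
  exact String.toList_injective (by rw [PySem.Str.toList_strip, PySem.Str.toList_strip, h])

-- the stripped (key, value) pairs A's while-loop and B's range-loop both walk
def pvPairs (parts : List String) (i : Nat) : List (String × String) :=
  if _h : i + 1 < parts.length then
    (PySem.Str.strip (parts.getD i ""), PySem.Str.strip (parts.getD (i + 1) "")) :: pvPairs parts (i + 2)
  else []
termination_by parts.length - i

def pvVals (k : String) (ps : List (String × String)) : List String :=
  (ps.filter (fun p => p.1 == k)).map (fun p => p.2)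

-- one dict-update step of A's kv accumulation, on the value at a fixed key
def pvStep (o : Option (String ⊕ List String)) (v : String) : Option (String ⊕ List String) :=
  some (match o with
    | none => Sum.inl v
    | some (Sum.inl u) => Sum.inr [u, v]
    | some (Sum.inr l) => Sum.inr (l ++ [v]))

theorem pv_kvLoop_get? (parts : List String) (i : Nat)
    (kv : PySem.Dict String (String ⊕ List String)) (k : String) (hk : k ≠ "") :
    (pvKvLoopA parts i kv).get? k = (pvVals k (pvPairs parts i)).foldl pvStep (kv.get? k) := by
  fun_induction pvKvLoopA parts i kv with
  | case1 i kv h key val kv' ih =>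
    rw [pvPairs]
    simp only [dif_pos h]
    rw [ih]
    by_cases hkey : key = k
    · subst hkey
      have hne : ¬ (key = "") := hk
      have hget : kv'.get? key = pvStep (kv.get? key) val := by
        show (if key = "" then kv else _).get? key = _
        rw [if_neg hne]
        cases hg : kv.get? key with
        | none => simp [pvStep, PySem.Dict.get?_insert_self]
        | some x => cases x <;> simp [pvStep, PySem.Dict.get?_insert_self]
      rw [hget]
      have hv : pvVals key ((key, val) :: pvPairs parts (i + 2)) = val :: pvVals key (pvPairs parts (i + 2)) := by
        simp [pvVals]
      rw [hv, List.foldl_cons]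
    · have hget : kv'.get? k = kv.get? k := by
        show (if key = "" then kv else _).get? k = _
        by_cases he : key = ""
        · rw [if_pos he]
        · rw [if_neg he]
          have hne' : k ≠ key := fun hh => hkey hh.symm
          cases hg : kv.get? key with
          | none => simp [PySem.Dict.get?_insert_of_ne _ _ hne']
          | some x => cases x <;> simp [PySem.Dict.get?_insert_of_ne _ _ hne']
      rw [hget]
      have hv : pvVals k ((key, val) :: pvPairs parts (i + 2)) = pvVals k (pvPairs parts (i + 2)) := by
        simp [pvVals, hkey]
      rw [hv]
  | case2 i kv h =>
    rw [pvPairs]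
    simp [h, pvVals]

theorem pv_segScan_eq (parts : List String) (i : Nat) (ss is : List String) :
    pvSegScanB parts i ss is =
      (ss ++ pvVals "SCOPE" (pvPairs parts i), is ++ pvVals "IMPACT" (pvPairs parts i)) := by
  fun_induction pvSegScanB parts i ss is with
  | case1 i ss is h key hks ih =>
    rw [pvPairs]
    simp only [dif_pos h]
    rw [ih]
    have hks' : PySem.Str.strip (parts[i]?.getD "") = "SCOPE" := hks
    simp [pvVals, List.getD, hks']
  | case2 i ss is h key hns hks ih =>
    rw [pvPairs]
    simp only [dif_pos h]
    rw [ih]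
    have hks' : PySem.Str.strip (parts[i]?.getD "") = "IMPACT" := hks
    have hns' : ¬ (PySem.Str.strip (parts[i]?.getD "") = "SCOPE") := hns
    simp [pvVals, List.getD, hks']
  | case3 i ss is h key hns hni ih =>
    rw [pvPairs]
    simp only [dif_pos h]
    rw [ih]
    have hns' : ¬ (PySem.Str.strip (parts[i]?.getD "") = "SCOPE") := hns
    have hni' : ¬ (PySem.Str.strip (parts[i]?.getD "") = "IMPACT") := hni
    simp [pvVals, List.getD, hns', hni']
  | case4 i ss is h =>
    rw [pvPairs]
    simp [h, pvVals]

theorem pv_vals_stripped (k : String) (parts : List String) (i : Nat) :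
    ∀ v ∈ pvVals k (pvPairs parts i), PySem.Str.strip v = v := by
  fun_induction pvPairs parts i with
  | case1 i h ih =>
    intro v hv
    simp only [pvVals, List.filter_cons] at hv
    by_cases hb : ((PySem.Str.strip (parts.getD i ""), PySem.Str.strip (parts.getD (i+1) "")).1 == k) = true
    · rw [if_pos hb] at hv
      simp only [List.map_cons, List.mem_cons] at hv
      rcases hv with rfl | hv
      · exact pv_strip_idem _
      · exact ih v (by simpa [pvVals] using hv)
    · rw [if_neg hb] at hv
      exact ih v (by simpa [pvVals] using hv)
  | case2 i h =>
    intro v hv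
    simp [pvVals] at hv

def pvExtract (o : Option (String ⊕ List String)) : List String :=
  match o with
  | none => []
  | some (Sum.inl s) => if s = "" then [] else [s]
  | some (Sum.inr l) => l

theorem pv_foldl_step_inr (L : List String) (l : List String) :
    L.foldl pvStep (some (Sum.inr l)) = some (Sum.inr (l ++ L)) := by
  induction L generalizing l with
  | nil => simp
  | cons v L ih =>
    simp only [List.foldl_cons]
    show L.foldl pvStep (some (Sum.inr (l ++ [v]))) = _
    rw [ih]
    simp

theorem pv_extract_foldl (L : List String) :
    pvExtract (L.foldl pvStep none) = if L = [""] then [] else L := by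
  match L with
  | [] => simp [pvExtract]
  | [v] =>
    by_cases hv : v = "" <;> simp [pvStep, pvExtract, hv]
  | v1 :: v2 :: rest =>
    have h2 : ((v1 :: v2 :: rest).foldl pvStep none) = some (Sum.inr (v1 :: v2 :: rest)) := by
      simp only [List.foldl_cons]
      show rest.foldl pvStep (pvStep (pvStep none v1) v2) = _
      simp only [pvStep]
      exact pv_foldl_step_inr rest [v1, v2]
    rw [h2]
    simp [pvExtract]

theorem pv_foldl_step_ne_none (L : List String) (hL : L ≠ []) :
    (L.foldl pvStep none).isSome := by
  match L with
  | [] => exact absurd rfl hL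
  | v :: rest =>
    simp only [List.foldl_cons]
    show (rest.foldl pvStep (pvStep none v)).isSome
    have hs : ∀ (M : List String) (o : String ⊕ List String), (M.foldl pvStep (some o)).isSome := by
      intro M
      induction M with
      | nil => simp
      | cons w M ih => intro o; simp only [List.foldl_cons]; exact ih _
    exact hs rest _

theorem pv_inner_eq (LI : List String) (hstr : ∀ v ∈ LI, PySem.Str.strip v = v)
    (si : PySem.Dict String (List String)) (s : String) :
    (pvExtract (LI.foldl pvStep none)).foldl (fun si imp0 =>
        let imp := PySem.Str.strip imp0
        if imp = "" then si
        else if (si.getD s []).contains imp then si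
        else si.insert s (si.getD s [] ++ [imp])) si
      = LI.foldl (fun si imp =>
          if imp = "" then si
          else if (si.getD s []).contains imp then si
          else si.insert s (si.getD s [] ++ [imp])) si := by
  rw [pv_extract_foldl]
  by_cases hL : LI = [""]
  · subst hL
    simp
  · rw [if_neg hL]
    apply PySem.List.foldl_congr_mem
    intro acc x hx
    simp only [hstr x hx]

theorem pv_match_getD_eq_extract (kv : PySem.Dict String (String ⊕ List String)) (k : String) :
    (match kv.getD k (Sum.inl "") with
      | Sum.inr l => l
      | Sum.inl s => if s = "" then [] else [s]) = pvExtract (kv.get? k) := by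
  rw [PySem.Dict.getD_eq_get?_getD]
  cases h : kv.get? k with
  | none => rfl
  | some x => cases x <;> rfl

theorem pv_outer_eq (LS LI : List String)
    (hS : ∀ v ∈ LS, PySem.Str.strip v = v) (hI : ∀ v ∈ LI, PySem.Str.strip v = v)
    (si : PySem.Dict String (List String)) :
    (pvExtract (LS.foldl pvStep none)).foldl (fun si s0 =>
        let s := PySem.Str.strip s0
        if s = "" then si
        else
          let si := if si.contains s then si else si.insert s []
          (pvExtract (LI.foldl pvStep none)).foldl (fun si imp0 =>
            let imp := PySem.Str.strip imp0
            if imp = "" then si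
            else if (si.getD s []).contains imp then si
            else si.insert s (si.getD s [] ++ [imp])) si) si
      = LS.foldl (fun si s =>
          if s = "" then si
          else
            let si := if si.contains s then si else si.insert s []
            LI.foldl (fun si imp =>
              if imp = "" then si
              else if (si.getD s []).contains imp then si
              else si.insert s (si.getD s [] ++ [imp])) si) si := by
  have hbody : ∀ (acc : PySem.Dict String (List String)) (x : String), x ∈ LS →
      (fun si s0 =>
        let s := PySem.Str.strip s0
        if s = "" then si
        else
          let si := if si.contains s then si else si.insert s []
          (pvExtract (LI.foldl pvStep none)).foldl (fun si imp0 =>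
            let imp := PySem.Str.strip imp0
            if imp = "" then si
            else if (si.getD s []).contains imp then si
            else si.insert s (si.getD s [] ++ [imp])) si) acc x
      = (fun si s =>
          if s = "" then si
          else
            let si := if si.contains s then si else si.insert s []
            LI.foldl (fun si imp =>
              if imp = "" then si
              else if (si.getD s []).contains imp then si
              else si.insert s (si.getD s [] ++ [imp])) si) acc x := by
    intro acc x hx
    simp only [hS x hx]
    by_cases hx0 : x = ""
    · simp [hx0]
    · simp only [if_neg hx0]
      exact pv_inner_eq LI hI _ x
  rw [pv_extract_foldl LS]
  by_cases hL : LS = [""]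
  · subst hL
    simp [pvExtract]
  · rw [if_neg hL]
    exact PySem.List.foldl_congr_mem _ _ _ _ hbody

theorem pv_seg_eq (seg : String) (si : PySem.Dict String (List String)) :
    (if PySem.Str.strip seg = "" then si
     else
       let kv := pvKvLoopA ((PySem.Str.split? (PySem.Str.strip seg) ":").getD []) 0 PySem.Dict.empty
       if kv.size = 0 then si else pvGroupStepA si kv)
      = pvGroupStepB si seg := by
  simp only [pvGroupStepB]
  by_cases hs : PySem.Str.strip seg = ""
  · simp [hs]
  · simp only [if_neg hs]
    rw [pv_segScan_eq]
    set parts := (PySem.Str.split? (PySem.Str.strip seg) ":").getD [] with hparts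
    set kv := pvKvLoopA parts 0 PySem.Dict.empty with hkv
    have hgetS : kv.get? "SCOPE" = (pvVals "SCOPE" (pvPairs parts 0)).foldl pvStep none := by
      rw [hkv, pv_kvLoop_get? parts 0 PySem.Dict.empty "SCOPE" (by decide)]
      rfl
    have hgetI : kv.get? "IMPACT" = (pvVals "IMPACT" (pvPairs parts 0)).foldl pvStep none := by
      rw [hkv, pv_kvLoop_get? parts 0 PySem.Dict.empty "IMPACT" (by decide)]
      rfl
    by_cases hsz : kv.size = 0
    · -- empty kv: both sides are si
      have hnone : kv.get? "SCOPE" = none := by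
        have hitems : kv.items = [] := List.length_eq_zero_iff.mp hsz
        have : kv = PySem.Dict.empty := PySem.Dict.ext (by simpa using hitems)
        rw [this]
        rfl
      have hLS : pvVals "SCOPE" (pvPairs parts 0) = [] := by
        by_contra hne
        have := pv_foldl_step_ne_none _ hne
        rw [← hgetS, hnone] at this
        simp at this
      rw [if_pos hsz]
      simp [hLS]
    · rw [if_neg hsz]
      simp only [pvGroupStepA]
      rw [pv_match_getD_eq_extract kv "SCOPE", pv_match_getD_eq_extract kv "IMPACT", hgetS, hgetI]
      exact pv_outer_eq _ _ (pv_vals_stripped _ parts 0) (pv_vals_stripped _ parts 0) si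

theorem pv_fold_eq (segs : List String) (acc : List (PySem.Dict String (String ⊕ List String)))
    (si : PySem.Dict String (List String)) :
    (segs.foldl (fun results seg0 =>
        let seg := PySem.Str.strip seg0
        if seg = "" then results
        else
          let kv := pvKvLoopA ((PySem.Str.split? seg ":").getD []) 0 PySem.Dict.empty
          if kv.size = 0 then results else results ++ [kv]) acc).foldl pvGroupStepA si
      = segs.foldl pvGroupStepB (acc.foldl pvGroupStepA si) := by
  induction segs generalizing acc with
  | nil => rfl
  | cons seg rest ih =>
    simp only [List.foldl_cons]
    rw [ih]
    have hseg := pv_seg_eq seg (acc.foldl pvGroupStepA si)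
    by_cases h1 : PySem.Str.strip seg = ""
    · rw [if_pos h1] at hseg ⊢
      rw [← hseg]
    · rw [if_neg h1] at hseg ⊢
      by_cases h2 : (pvKvLoopA ((PySem.Str.split? (PySem.Str.strip seg) ":").getD []) 0 PySem.Dict.empty).size = 0
      · simp only [h2, if_pos] at hseg ⊢
        rw [← hseg]
      · simp only [h2, if_false] at hseg ⊢
        rw [List.foldl_append]
        simp only [List.foldl_cons, List.foldl_nil]
        rw [hseg]

-- ===== VERDICT (by name: the statement is the Claim_ definition above) =====
theorem compact_consequences_py_spec : Claim_equal_compact_consequences_py := by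
  intro raw _
  unfold Spec_compact_consequences_py compact_consequences_py compact_consequences_py_alt
  by_cases h : raw = "" ∨ PySem.Str.strip raw = ""
  · simp [h]
  · simp only [h, if_false]
    have hfold := pv_fold_eq ((PySem.Str.split? raw "::").getD []) [] PySem.Dict.empty
    unfold pvParseKvSegments
    rw [hfold]
    rfl
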